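-- pv_equiv track=rewrite | github.com/BigfooTsp/Apuntes_python | prácticas/Enteros que son suma de cuadrados/Notas. Lista de enteros que son sumas de cuadrados.py | gen_raices2
-- ===== SOURCE A (Python) =====
-- def gen_raices2(min, max):
--     diccionario = {}
--
--     # Añade a la lista las sumas de raices.
--     e1 = 1
--     while e1 ** 2 <= max:
--         for e2 in range(1, max):
--             r1 = e1 ** 2
--             r2 = e2 ** 2
--             if r1+r2 > max:
--               continue
--             if r1+r2 not in diccionario:
--               diccionario[r1+r2] = set()
--             diccionario[r1+r2].add(tuple(sorted((r1,r2))))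
--         e1 += 1
--     return diccionario
-- ===== SOURCE B (Python) =====
-- def gen_raices2(min, max):
--     d = {}
--     e1 = 1
--     while e1 * e1 <= max:
--         r1 = e1 * e1
--         e2 = 1
--         while r1 + e2 * e2 <= max:
--             r2 = e2 * e2
--             pair = (r1, r2) if r1 <= r2 else (r2, r1)
--             d.setdefault(r1 + r2, set()).add(pair)
--             e2 += 1
--         e1 += 1
--     return d
-- ===== Notes on version B (the rewrite author's own statement) =====
-- stated objective: faster
-- what changed: B replaces A's inner scan of all e2 in range(1, max) (skipping pairs over the bound with continue) by an inner while loop that stops as soon as e1^2 + e2^2 exceeds max, and builds the per-key set with dict.setdefault.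
import Mathlib
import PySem

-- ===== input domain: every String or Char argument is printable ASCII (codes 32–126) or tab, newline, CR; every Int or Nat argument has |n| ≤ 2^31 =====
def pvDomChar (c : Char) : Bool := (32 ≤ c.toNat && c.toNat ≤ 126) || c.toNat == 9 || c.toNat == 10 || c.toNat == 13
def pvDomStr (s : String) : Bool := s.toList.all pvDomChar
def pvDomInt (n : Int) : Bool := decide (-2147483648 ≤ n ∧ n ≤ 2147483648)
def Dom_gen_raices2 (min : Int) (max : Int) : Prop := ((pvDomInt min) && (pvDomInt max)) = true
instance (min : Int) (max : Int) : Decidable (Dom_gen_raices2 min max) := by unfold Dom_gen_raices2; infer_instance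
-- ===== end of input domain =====

-- B bounds the inner loop by e1^2 + e2^2 <= max instead of scanning e2 up to max; faster (asymptotic).

-- ===== PORT A =====

-- a ≤ a^2 over Int (used only for termination of the while-loop ports)
theorem pv_le_sq (a : Int) : a ≤ a ^ 2 := by nlinarith [sq_nonneg a, sq_nonneg (a - 1)]

-- body of A's 'for e2 in range(1, max)' loop
def pvBodyA (mx e1 : Int) (d : PySem.Dict Int (PySem.Set (List Int))) (e2 : Int) :
    PySem.Dict Int (PySem.Set (List Int)) :=
  let r1 := e1 ^ 2
  let r2 := e2 ^ 2
  if r1 + r2 > mx then d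
  else
    let d' := if ¬ (d.contains (r1 + r2)) then d.insert (r1 + r2) PySem.Set.empty else d
    d'.modify (r1 + r2) PySem.Set.empty
      (fun s => PySem.Set.add s (PySem.List.sorted [r1, r2] (fun x => x) false))

-- A's outer 'while e1 ** 2 <= max' loop
def pvLoopA (mx e1 : Int) (d : PySem.Dict Int (PySem.Set (List Int))) :
    PySem.Dict Int (PySem.Set (List Int)) :=
  if h : e1 ^ 2 ≤ mx then
    pvLoopA mx (e1 + 1) ((PySem.List.pyRange 1 mx 1).foldl (pvBodyA mx e1) d)
  else d
termination_by (mx + 1 - e1).toNat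
decreasing_by
  have h1 : e1 ≤ mx := le_trans (pv_le_sq e1) h
  omega

def gen_raices2 (min : Int) (max : Int) : List (Int × List (List Int)) :=
  (pvLoopA max 1 PySem.Dict.empty).items

-- ===== PORT B =====

-- B's inner 'while r1 + e2 * e2 <= max' loop
def pvLoopB2 (mx r1 e2 : Int) (d : PySem.Dict Int (PySem.Set (List Int))) :
    PySem.Dict Int (PySem.Set (List Int)) :=
  if h : r1 + e2 * e2 ≤ mx then
    let r2 := e2 * e2
    let pair := if r1 ≤ r2 then [r1, r2] else [r2, r1]
    -- d.setdefault(r1 + r2, set()).add(pair)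
    pvLoopB2 mx r1 (e2 + 1)
      ((d.setdefault (r1 + r2) PySem.Set.empty).modify (r1 + r2) PySem.Set.empty
        (fun s => PySem.Set.add s pair))
  else d
termination_by (mx - r1 + 1 - e2).toNat
decreasing_by
  have h1 : e2 ≤ e2 * e2 := by nlinarith [sq_nonneg (e2 - 1)]
  omega

-- B's outer 'while e1 * e1 <= max' loop
def pvLoopB1 (mx e1 : Int) (d : PySem.Dict Int (PySem.Set (List Int))) :
    PySem.Dict Int (PySem.Set (List Int)) :=
  if h : e1 * e1 ≤ mx then
    pvLoopB1 mx (e1 + 1) (pvLoopB2 mx (e1 * e1) 1 d)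
  else d
termination_by (mx + 1 - e1).toNat
decreasing_by
  have h1 : e1 ≤ e1 * e1 := by nlinarith [sq_nonneg (e1 - 1)]
  omega

def gen_raices2_alt (min : Int) (max : Int) : List (Int × List (List Int)) :=
  (pvLoopB1 max 1 PySem.Dict.empty).items

-- ===== PRECONDITION & SPEC =====
def Spec_gen_raices2 (min : Int) (max : Int) (out : List (Int × List (List Int))) : Prop := out = gen_raices2_alt min max
instance (min : Int) (max : Int) (out : List (Int × List (List Int))) : Decidable (Spec_gen_raices2 min max out) := by unfold Spec_gen_raices2; infer_instance

-- ===== CLAIM (what is proved, stated in full; the proofs are below) =====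
def Claim_equal_gen_raices2 : Prop := ∀ (min : Int) (max : Int), Dom_gen_raices2 min max → Spec_gen_raices2 min max (gen_raices2 min max)

-- ===== LEMMAS AND PROOFS =====

-- sorted([a, b]) written out
theorem pv_sorted_pair (a b : Int) :
    PySem.List.sorted [a, b] (fun x => x) false = if a ≤ b then [a, b] else [b, a] := by
  split_ifs with h
  · exact PySem.List.sorted_id_eq_of_perm_of_pairwise _ _ (List.Perm.refl _) (by simp [h])
  · exact PySem.List.sorted_id_eq_of_perm_of_pairwise _ _ (List.Perm.swap _ _ _) (by simp; omega)

-- when the pair fits under the bound, A's body is exactly one B step's dict update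
theorem pv_bodyA_eq (mx e1 e2 : Int) (d : PySem.Dict Int (PySem.Set (List Int)))
    (h : e1 * e1 + e2 * e2 ≤ mx) :
    pvBodyA mx e1 d e2 =
      (d.setdefault (e1 * e1 + e2 * e2) PySem.Set.empty).modify (e1 * e1 + e2 * e2)
        PySem.Set.empty
        (fun s => PySem.Set.add s
          (if e1 * e1 ≤ e2 * e2 then [e1 * e1, e2 * e2] else [e2 * e2, e1 * e1])) := by
  simp only [pvBodyA, pow_two, pv_sorted_pair]
  rw [if_neg (by omega)]
  by_cases hc : d.contains (e1 * e1 + e2 * e2)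
  · rw [PySem.Dict.setdefault_of_contains d _ hc]
    simp [hc]
  · rw [PySem.Dict.setdefault_of_not_contains d _ (by simpa using hc)]
    simp [hc]

-- once the pair overflows the bound, every later e2 of A's range is skipped
theorem pv_skip_all (mx e1 : Int) (l : List Int) (hall : ∀ t ∈ l, mx < e1 * e1 + t * t) :
    ∀ d, l.foldl (pvBodyA mx e1) d = d := by
  induction l with
  | nil => intro d; rfl
  | cons x xs ih =>
    intro d
    have hx := hall x (by simp)
    have hbody : pvBodyA mx e1 d x = d := by
      simp only [pvBodyA, pow_two]
      rw [if_pos (by omega)]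
    rw [List.foldl_cons, hbody]
    exact ih (fun t ht => hall t (by simp [ht])) d

-- A's inner range loop from any start s ≥ 1 equals B's bounded inner while loop
theorem pv_inner_eq (mx e1 : Int) (he1 : 1 ≤ e1) :
    ∀ (n : Nat) (s : Int), 1 ≤ s → (mx - s).toNat ≤ n →
      ∀ d, (PySem.List.pyRange s mx 1).foldl (pvBodyA mx e1) d = pvLoopB2 mx (e1 * e1) s d := by
  intro n
  induction n with
  | zero =>
    intro s hs hn d
    have hms : mx ≤ s := by omega
    rw [PySem.List.pyRange_one_eq_nil hms, List.foldl_nil, pvLoopB2]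
    rw [dif_neg (by nlinarith)]
  | succ n ih =>
    intro s hs hn d
    by_cases hms : mx ≤ s
    · rw [PySem.List.pyRange_one_eq_nil hms, List.foldl_nil, pvLoopB2]
      rw [dif_neg (by nlinarith)]
    · push_neg at hms
      rw [PySem.List.pyRange_one_cons hms, List.foldl_cons]
      by_cases hfit : e1 * e1 + s * s ≤ mx
      · rw [pv_bodyA_eq mx e1 s d hfit, ih (s + 1) (by omega) (by omega)]
        conv_rhs => rw [pvLoopB2]
        rw [dif_pos hfit]
      · push_neg at hfit
        have hbody : pvBodyA mx e1 d s = d := by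
          simp only [pvBodyA, pow_two]
          rw [if_pos (by omega)]
        rw [hbody,
          pv_skip_all mx e1 _ (fun t ht => by
            have := (PySem.List.mem_pyRange_one.mp ht).1
            nlinarith) d,
          pvLoopB2, dif_neg (by omega)]

-- the two outer while loops agree from any start e1 ≥ 1
theorem pv_outer_eq (mx : Int) :
    ∀ (n : Nat) (e1 : Int), 1 ≤ e1 → (mx + 1 - e1).toNat ≤ n →
      ∀ d, pvLoopA mx e1 d = pvLoopB1 mx e1 d := by
  intro n
  induction n with
  | zero =>
    intro e1 he1 hn d
    have hstop : ¬ e1 ^ 2 ≤ mx := by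
      intro h
      have := le_trans (pv_le_sq e1) h
      omega
    rw [pvLoopA, dif_neg hstop, pvLoopB1, dif_neg (by rwa [← pow_two])]
  | succ n ih =>
    intro e1 he1 hn d
    by_cases h : e1 ^ 2 ≤ mx
    · have hle : e1 ≤ mx := le_trans (pv_le_sq e1) h
      rw [pvLoopA, dif_pos h, pvLoopB1, dif_pos (by rwa [pow_two] at h)]
      rw [pv_inner_eq mx e1 he1 (mx - 1).toNat 1 le_rfl le_rfl d]
      exact ih (e1 + 1) (by omega) (by omega) _
    · rw [pvLoopA, dif_neg h, pvLoopB1, dif_neg (by rwa [← pow_two])]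

-- ===== VERDICT (by name: the statement is the Claim_ definition above) =====
theorem gen_raices2_spec : Claim_equal_gen_raices2 := by
  intro mn mx _
  unfold Spec_gen_raices2 gen_raices2 gen_raices2_alt
  rw [pv_outer_eq mx ((mx + 1 - 1).toNat) 1 le_rfl le_rfl]
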